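-- pv_equiv track=rewrite | github.com/fakokk/7semester | zachita_information/4lab.py | bin2str
-- ===== SOURCE A (Python) =====
-- def bin2str(message):
--   symbols = ""
--   num = 0
--   # пока не закончится строка
--   while num < len(message):
--     bit1 = bin(message[num])[2:].zfill(8)
--     bit2 = bin(message[num+1])[2:].zfill(8)
--
--     number = bit1 + bit2
--     number = number[::-1]
--     bit = 0
--     for i in range(len(number)):
--       bit += int(number[i]) * (2 ** i)
--
--     symbols += chr(bit)
--     num += 2
--   return symbols
-- ===== SOURCE B (Python) =====
-- def bin2str(message):
--     # Read each pair of bytes directly as a big-endian 16-bit code point: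
--     # no bit-string construction, no per-bit accumulation.
--     chars = []
--     num = 0
--     while num < len(message):
--         chars.append(chr(message[num] * 256 + message[num + 1]))
--         num += 2
--     return "".join(chars)
-- ===== Notes on version B (the rewrite author's own statement) =====
-- stated objective: simpler
-- what changed: B reads each byte pair directly as the big-endian code message[num]*256+message[num+1] and joins the chars, removing A's per-pair bit-string construction (bin/zfill/concatenate/reverse) and the 16-iteration per-bit accumulation loop.
-- outside the precondition, e.g. on bin2str([1, 300]): A returns '̬', B returns 'Ȭ'
import Mathlib
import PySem

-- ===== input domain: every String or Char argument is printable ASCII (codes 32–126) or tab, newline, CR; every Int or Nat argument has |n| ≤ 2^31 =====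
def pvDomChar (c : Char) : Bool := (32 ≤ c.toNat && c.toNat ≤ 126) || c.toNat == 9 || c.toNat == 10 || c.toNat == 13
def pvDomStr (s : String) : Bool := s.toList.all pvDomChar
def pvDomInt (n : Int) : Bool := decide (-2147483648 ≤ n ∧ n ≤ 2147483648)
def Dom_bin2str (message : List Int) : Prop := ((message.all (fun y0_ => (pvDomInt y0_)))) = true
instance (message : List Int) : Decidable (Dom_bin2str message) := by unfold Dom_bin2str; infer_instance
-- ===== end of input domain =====

-- B reads each byte pair directly as the big-endian code hi*256+lo, dropping A's
-- bit-string build (bin/zfill/concat/reverse) and the per-bit accumulation loop (objective: simpler).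

-- ===== PORT A =====
def bin2str (message : List Int) : String :=
  match message with
  | m0 :: m1 :: rest =>
      -- bit1 = bin(message[num])[2:].zfill(8) ; bit2 likewise
      let bit1 := PySem.Chars.zfill (PySem.List.slice (PySem.Int.toBinChars0b m0) (some 2) none) 8
      let bit2 := PySem.Chars.zfill (PySem.List.slice (PySem.Int.toBinChars0b m1) (some 2) none) 8
      let number := bit1 ++ bit2
      let number := number.reverse   -- number[::-1]
      -- for i in range(len(number)): bit += int(number[i]) * 2**i
      -- int(number[i]) ported as code-48: exact for the '0'/'1' digit chars that occur on
      -- admitted inputs (on a '-'/'b' char Python's int() raises; such inputs are outside Pre_)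
      let bit : Int := (PySem.List.pyRange 0 (PySem.List.len number) 1).foldl
        (fun b i => b + (((PySem.List.pyGetD number i ' ').toNat : Int) - 48) * 2 ^ i.toNat) 0
      -- chr(bit): exact for valid non-surrogate code points (others are outside Pre_)
      String.singleton (Char.ofNat bit.toNat) ++ bin2str rest
  | _ => ""   -- loop ends; an odd leftover element would make Python raise IndexError (outside Pre_)

-- ===== PORT B =====
def bin2str_alt (message : List Int) : String :=
  match message with
  | [] => ""        -- loop exhausted
  | [_] => ""       -- odd leftover: Python raises IndexError here (outside Pre_)
  | m0 :: m1 :: rest => String.singleton (Char.ofNat (m0 * 256 + m1).toNat) ++ bin2str_alt rest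

-- ===== PRECONDITION & SPEC =====
-- Pre_ restricts to the natural input domain of this decoder — an even-length list of
-- bytes (0..255) whose 16-bit pair codes are not UTF-16 surrogates: on odd length A raises
-- IndexError, on negative elements int() raises ValueError, elements ≥ 256 are malformed
-- input on which A's bit-string concatenation yields accidental widths (and chr may raise),
-- and surrogate code points are not representable as Lean Chars.
def Pre_bin2str (message : List Int) : Prop :=
  message.length % 2 = 0 ∧
  (∀ x ∈ message, 0 ≤ x ∧ x < 256) ∧
  (∀ i ∈ List.range (message.length / 2),
     ¬ (55296 ≤ message.getD (2*i) 0 * 256 + message.getD (2*i+1) 0 ∧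
        message.getD (2*i) 0 * 256 + message.getD (2*i+1) 0 ≤ 57343))
instance (message : List Int) : Decidable (Pre_bin2str message) := by
  unfold Pre_bin2str; infer_instance

def pvWitness_bin2str : List Int := [0, 72, 0, 105]

def Spec_bin2str (message : List Int) (out : String) : Prop := out = bin2str_alt message
instance (message : List Int) (out : String) : Decidable (Spec_bin2str message out) := by unfold Spec_bin2str; infer_instance

-- ===== CLAIM (what is proved, stated in full; the proofs are below) =====
def Claim_equal_bin2str : Prop := ∀ (message : List Int), Dom_bin2str message → Pre_bin2str message → Spec_bin2str message (bin2str message)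

-- ===== LEMMAS AND PROOFS =====

-- value of a digit char, as in the port's inner loop
def pvV (c : Char) : Int := (c.toNat : Int) - 48
-- big-endian value of a bit string
def pvBv (cs : List Char) : Int := cs.foldl (fun a c => 2*a + pvV c) 0
-- reference binary digits of a positive Nat
def pvBinAux : Nat → List Char
  | 0 => []
  | n+1 => pvBinAux ((n+1)/2) ++ [Nat.digitChar ((n+1) % 2)]
decreasing_by exact Nat.div_lt_self (Nat.succ_pos n) one_lt_two

lemma pvBvF (cs : List Char) : ∀ a : Int,
    cs.foldl (fun a c => 2*a + pvV c) a = a * 2 ^ cs.length + pvBv cs := by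
  induction cs with
  | nil => intro a; simp [pvBv]
  | cons c tl ih =>
      intro a
      have h1 := ih (2*a + pvV c)
      have h2 := ih (2*0 + pvV c)
      simp only [List.foldl_cons, pvBv] at *
      rw [h1, h2]; simp [pow_succ]; ring

lemma pvBv_append (xs ys : List Char) :
    pvBv (xs ++ ys) = pvBv xs * 2 ^ ys.length + pvBv ys := by
  rw [pvBv, List.foldl_append]
  exact pvBvF ys (pvBv xs)

-- the port's per-bit loop equals the big-endian value of the unreversed string
def pvE (cs : List Char) : Int :=
  (PySem.List.enumerate cs 0).foldl (fun b p => b + pvV p.2 * 2 ^ p.1.toNat) 0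

lemma pvFold_eq_pvE (xs : List Char) :
    (PySem.List.pyRange 0 (PySem.List.len xs) 1).foldl
      (fun b i => b + (((PySem.List.pyGetD xs i ' ').toNat : Int) - 48) * 2 ^ i.toNat) 0
    = pvE xs := by
  rw [pvE, PySem.List.enumerate_eq_map_pyRange xs ' ', List.foldl_map]
  rfl

lemma pvE_append_singleton (xs : List Char) (c : Char) :
    pvE (xs ++ [c]) = pvE xs + pvV c * 2 ^ xs.length := by
  rw [pvE, PySem.List.enumerate_append, List.foldl_append]
  simp [PySem.List.enumerate, pvE]

lemma pvE_reverse (cs : List Char) : pvE cs.reverse = pvBv cs := by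
  induction cs with
  | nil => rfl
  | cons c tl ih =>
      rw [List.reverse_cons, pvE_append_singleton, ih]
      have : pvBv (c :: tl) = (2*0 + pvV c) * 2 ^ tl.length + pvBv tl := by
        rw [pvBv, List.foldl_cons]; exact pvBvF tl _
      simp [this]; ring

lemma pvBinAux_zero : pvBinAux 0 = [] := by simp [pvBinAux]

lemma pvBinAux_unfold (n : Nat) (h : n ≠ 0) :
    pvBinAux n = pvBinAux (n/2) ++ [Nat.digitChar (n % 2)] := by
  cases n with
  | zero => exact absurd rfl h
  | succ m => rw [pvBinAux]

lemma toDigitsCore_eq : ∀ (fuel n : Nat) (ds : List Char), n ≠ 0 → n ≤ fuel →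
    Nat.toDigitsCore 2 fuel n ds = pvBinAux n ++ ds := by
  intro fuel
  induction fuel with
  | zero => intro n ds h0 h1; omega
  | succ f ih =>
      intro n ds h0 h1
      rw [Nat.toDigitsCore]
      by_cases h2 : n / 2 = 0
      · have hn1 : n = 1 := by omega
        subst hn1
        simp [pvBinAux_unfold 1 (by omega), pvBinAux_zero]
      · simp only [h2, if_false]
        rw [ih (n/2) _ h2 (by omega), pvBinAux_unfold n h0, List.append_assoc]
        rfl

lemma toDigits_two (n : Nat) :
    Nat.toDigits 2 n = if n = 0 then ['0'] else pvBinAux n := by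
  by_cases h : n = 0
  · subst h; rfl
  · rw [Nat.toDigits, toDigitsCore_eq (n+1) n [] h (by omega)]
    simp [h]

lemma pvBv_append_singleton (xs : List Char) (c : Char) :
    pvBv (xs ++ [c]) = 2 * pvBv xs + pvV c := by
  rw [pvBv, List.foldl_append]; rfl

lemma pvBv_binAux (n : Nat) : pvBv (pvBinAux n) = n := by
  induction n using Nat.strong_induction_on with
  | _ n ih =>
      by_cases h : n = 0
      · subst h; simp [pvBinAux_zero, pvBv]
      · rw [pvBinAux_unfold n h, pvBv_append_singleton,
            ih (n/2) (Nat.div_lt_self (Nat.pos_of_ne_zero h) one_lt_two)]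
        have h2 : n % 2 = 0 ∨ n % 2 = 1 := Nat.mod_two_eq_zero_or_one n
        rcases h2 with h2 | h2 <;> rw [h2] <;> simp [Nat.digitChar, pvV] <;> omega

lemma pvBinAux_chars (n : Nat) : ∀ c ∈ pvBinAux n, c = '0' ∨ c = '1' := by
  induction n using Nat.strong_induction_on with
  | _ n ih =>
      intro c hc
      by_cases h : n = 0
      · subst h; simp [pvBinAux] at hc
      · rw [pvBinAux_unfold n h] at hc
        rcases List.mem_append.mp hc with h1 | h1
        · exact ih (n/2) (Nat.div_lt_self (Nat.pos_of_ne_zero h) one_lt_two) c h1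
        · have h2 : n % 2 = 0 ∨ n % 2 = 1 := Nat.mod_two_eq_zero_or_one n
          simp at h1
          rcases h2 with h2 | h2 <;> rw [h2] at h1 <;> simp [Nat.digitChar] at h1 <;> simp [h1]

lemma pvBinAux_len (n : Nat) : ∀ k, n < 2 ^ k → (pvBinAux n).length ≤ k := by
  induction n using Nat.strong_induction_on with
  | _ n ih =>
      intro k hk
      by_cases h : n = 0
      · subst h; simp [pvBinAux]
      · cases k with
        | zero => simp at hk; omega
        | succ k' =>
            rw [pvBinAux_unfold n h]
            have hlt : n / 2 < 2 ^ k' := by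
              rw [pow_succ] at hk; omega
            have := ih (n/2) (Nat.div_lt_self (Nat.pos_of_ne_zero h) one_lt_two) k' hlt
            simp; omega

lemma zfill_digits (cs : List Char) (h : ∀ c ∈ cs, c = '0' ∨ c = '1') :
    PySem.Chars.zfill cs 8 = List.replicate (8 - cs.length) '0' ++ cs := by
  rw [PySem.Chars.zfill.eq_def]
  by_cases hle : (8 : Int) ≤ (cs.length : Int)
  · rw [if_pos hle]
    have : 8 - cs.length = 0 := by omega
    rw [this]; rfl
  · rw [if_neg hle]
    cases cs with
    | nil => simp
    | cons c rest =>
        have hc := h c (by simp)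
        have hns : ¬ (c = '+' ∨ c = '-') := by
          rcases hc with hc | hc <;> subst hc <;> decide
        simp only [hns, if_false]
        norm_num [show Int.toNat 8 = 8 from rfl]

lemma pvBv_replicate_zero (k : Nat) : pvBv (List.replicate k '0') = 0 := by
  induction k with
  | zero => rfl
  | succ m ih =>
      have : List.replicate (m+1) '0' = List.replicate m '0' ++ ['0'] := by
        rw [List.replicate_succ']
      rw [this, pvBv_append_singleton, ih]
      decide

lemma pvBv_pad (k : Nat) (cs : List Char) :
    pvBv (List.replicate k '0' ++ cs) = pvBv cs := by
  rw [pvBv_append, pvBv_replicate_zero]; ring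

-- the zfilled binary string of a byte m has value m and length 8
lemma pvByte (m : Int) (h0 : 0 ≤ m) (h1 : m < 256) :
    pvBv (PySem.Chars.zfill (PySem.List.slice (PySem.Int.toBinChars0b m) (some 2) none) 8) = m ∧
    (PySem.Chars.zfill (PySem.List.slice (PySem.Int.toBinChars0b m) (some 2) none) 8).length = 8 := by
  have hstrip : PySem.List.slice (PySem.Int.toBinChars0b m) (some 2) none
      = Nat.toDigits 2 m.toNat := by
    rw [PySem.List.slice_from _ (by norm_num : (0:Int) ≤ 2)]
    rw [PySem.Int.toBinChars0b, if_neg (by omega)]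
    rfl
  have hchars : ∀ c ∈ Nat.toDigits 2 m.toNat, c = '0' ∨ c = '1' := by
    rw [toDigits_two]
    split
    · intro c hc; simp at hc; simp [hc]
    · exact pvBinAux_chars m.toNat
  have hlen : (Nat.toDigits 2 m.toNat).length ≤ 8 := by
    rw [toDigits_two]
    split
    · simp
    · exact pvBinAux_len m.toNat 8 (by omega)
  have hval : pvBv (Nat.toDigits 2 m.toNat) = m := by
    rw [toDigits_two]
    split
    · rename_i h; rw [show pvBv ['0'] = 0 by decide]; omega
    · rw [pvBv_binAux]; omega
  rw [hstrip, zfill_digits _ hchars]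
  constructor
  · rw [pvBv_pad]; exact hval
  · simp; omega

-- two-at-a-time list induction matching both ports' recursion
lemma pvTwoStep (P : List Int → Prop) (h0 : P []) (h1 : ∀ m, P [m])
    (h2 : ∀ a b l, P l → P (a :: b :: l)) : ∀ l, P l
  | [] => h0
  | [m] => h1 m
  | a :: b :: l => h2 a b l (pvTwoStep P h0 h1 h2 l)

lemma pvMain : ∀ (message : List Int), (∀ x ∈ message, 0 ≤ x ∧ x < 256) →
    bin2str message = bin2str_alt message := by
  apply pvTwoStep (fun l => (∀ x ∈ l, 0 ≤ x ∧ x < 256) → bin2str l = bin2str_alt l)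
  · intro _; rfl
  · intro m _; rfl
  · intro a b l ih hmem
    have ha := hmem a (by simp)
    have hb := hmem b (by simp)
    obtain ⟨hva, hla⟩ := pvByte a ha.1 ha.2
    obtain ⟨hvb, hlb⟩ := pvByte b hb.1 hb.2
    rw [bin2str, bin2str_alt]
    have hbit :
        (PySem.List.pyRange 0 (PySem.List.len
            ((PySem.Chars.zfill (PySem.List.slice (PySem.Int.toBinChars0b a) (some 2) none) 8 ++
              PySem.Chars.zfill (PySem.List.slice (PySem.Int.toBinChars0b b) (some 2) none) 8).reverse)) 1).foldl
          (fun bacc i => bacc + (((PySem.List.pyGetD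
            ((PySem.Chars.zfill (PySem.List.slice (PySem.Int.toBinChars0b a) (some 2) none) 8 ++
              PySem.Chars.zfill (PySem.List.slice (PySem.Int.toBinChars0b b) (some 2) none) 8).reverse) i ' ').toNat : Int) - 48) * 2 ^ i.toNat) 0
        = a * 256 + b := by
      rw [pvFold_eq_pvE, pvE_reverse, pvBv_append, hva, hvb, hlb]
      norm_num
    rw [hbit, ih (fun x hx => hmem x (by simp [hx]))]

-- ===== VERDICT (by name: the statement is the Claim_ definition above) =====
theorem bin2str_spec : Claim_equal_bin2str := by
  intro message _ hpre
  unfold Spec_bin2str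
  exact pvMain message hpre.2.1
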